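-- pv_equiv track=rewrite | github.com/apache/superset | lib/python2.7/site-packages/pylint/checkers/format.py | _get_indent_length
-- ===== SOURCE A (Python) =====
-- _TAB_LENGTH = 8
--
-- def _get_indent_length(line):
--     """Return the length of the indentation on the given token's line."""
--     result = 0
--     for char in line:
--         if char == ' ':
--             result += 1
--         elif char == '\t':
--             result += _TAB_LENGTH
--         else:
--             break
--     return result
-- ===== SOURCE B (Python) =====
-- _TAB_LENGTH = 8
--
-- def _get_indent_length(line):
--     """Return the length of the indentation on the given token's line."""
--     prefix = line[:len(line) - len(line.lstrip(' \t'))]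
--     return prefix.count(' ') + prefix.count('\t') * _TAB_LENGTH
-- ===== Notes on version B (the rewrite author's own statement) =====
-- stated objective: simpler
-- what changed: Replaces the accumulating per-character loop with early break by isolating the leading space/tab prefix via lstrip and computing the length from two counts over that prefix.
import Mathlib
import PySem

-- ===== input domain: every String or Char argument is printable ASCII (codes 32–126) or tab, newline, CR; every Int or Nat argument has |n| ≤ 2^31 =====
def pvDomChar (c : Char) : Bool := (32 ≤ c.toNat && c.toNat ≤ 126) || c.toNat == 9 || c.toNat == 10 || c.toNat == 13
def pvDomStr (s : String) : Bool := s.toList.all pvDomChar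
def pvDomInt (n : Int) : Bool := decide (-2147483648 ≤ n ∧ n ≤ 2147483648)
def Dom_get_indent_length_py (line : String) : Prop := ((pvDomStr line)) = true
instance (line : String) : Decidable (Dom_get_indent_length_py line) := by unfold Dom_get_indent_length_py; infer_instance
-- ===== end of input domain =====

-- B isolates the leading space/tab prefix with lstrip(' \t') and sums two counts over it,
-- replacing A's accumulating loop with an early break; objective: simpler decomposition.


-- ===== PORT A =====
-- the for-loop with break: structural recursion over the characters, accumulator result
def pvLoopA : List Char → Int → Int
  | [], result => result
  | c :: cs, result =>
    if c = ' ' then pvLoopA cs (result + 1)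
    else if c = '\t' then pvLoopA cs (result + 8)
    else result

def get_indent_length_py (line : String) : Int := pvLoopA line.toList 0

-- ===== PORT B =====
-- line.lstrip(' \t'): PySem has no left-strip with a chars argument, ported by hand, exact:
-- drop leading characters that are ' ' or '\t'
def pvLstripST : List Char → List Char
  | [] => []
  | c :: cs => if c = ' ' ∨ c = '\t' then pvLstripST cs else c :: cs

def get_indent_length_py_alt (line : String) : Int :=
  let cs := line.toList
  let pre := PySem.List.slice cs none (some ((cs.length : Int) - ((pvLstripST cs).length : Int)))
  (PySem.Chars.count pre [' '] : Int) + (PySem.Chars.count pre ['\t'] : Int) * 8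

-- ===== PRECONDITION & SPEC =====
def Spec_get_indent_length_py (line : String) (out : Int) : Prop := out = get_indent_length_py_alt line
instance (line : String) (out : Int) : Decidable (Spec_get_indent_length_py line out) := by unfold Spec_get_indent_length_py; infer_instance

-- ===== CLAIM (what is proved, stated in full; the proofs are below) =====
def Claim_equal_get_indent_length_py : Prop := ∀ (line : String), Dom_get_indent_length_py line → Spec_get_indent_length_py line (get_indent_length_py line)

-- ===== LEMMAS AND PROOFS =====
theorem pvLstripST_length_le (cs : List Char) : (pvLstripST cs).length ≤ cs.length := by
  induction cs with
  | nil => simp [pvLstripST]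
  | cons c cs ih =>
    simp only [pvLstripST]
    split
    · exact Nat.le_succ_of_le ih
    · simp

theorem pvCount_go_single (c : Char) : ∀ (cs : List Char) (fuel acc : Nat), cs.length ≤ fuel →
    PySem.Chars.count.go [c] fuel cs acc = acc + cs.count c := by
  intro cs
  induction cs with
  | nil => intro fuel acc _; cases fuel <;> simp [PySem.Chars.count.go]
  | cons d cs ih =>
    intro fuel acc h
    cases fuel with
    | zero => simp at h
    | succ f =>
      rw [PySem.Chars.count.go]
      simp only [List.length_cons] at h
      by_cases hd : c = d
      · subst hd
        simp [List.isPrefixOf, ih f (acc + 1) (by omega)]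
        omega
      · simp [List.isPrefixOf, hd, Ne.symm hd, ih f acc (by omega)]

theorem pvCount_single (cs : List Char) (c : Char) :
    PySem.Chars.count cs [c] = cs.count c := by
  simp [PySem.Chars.count, pvCount_go_single c cs cs.length 0 le_rfl]

theorem pvKey (cs : List Char) (r : Int) :
    pvLoopA cs r =
      r + (((cs.take (cs.length - (pvLstripST cs).length)).count ' ' : Int)
        + ((cs.take (cs.length - (pvLstripST cs).length)).count '\t' : Int) * 8) := by
  induction cs generalizing r with
  | nil => simp [pvLoopA, pvLstripST]
  | cons c cs ih =>
    have hle := pvLstripST_length_le cs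
    by_cases hsp : c = ' '
    · subst hsp
      have hstrip : pvLstripST (' ' :: cs) = pvLstripST cs := by simp [pvLstripST]
      have hn : (' ' :: cs).length - (pvLstripST (' ' :: cs)).length
          = (cs.length - (pvLstripST cs).length) + 1 := by
        rw [hstrip]; simp only [List.length_cons]; omega
      rw [hn]
      simp only [List.take_succ_cons, List.count_cons, pvLoopA]
      rw [ih (r + 1)]
      simp
      ring
    · by_cases htb : c = '\t'
      · subst htb
        have hstrip : pvLstripST ('\t' :: cs) = pvLstripST cs := by simp [pvLstripST]
        have hn : ('\t' :: cs).length - (pvLstripST ('\t' :: cs)).length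
            = (cs.length - (pvLstripST cs).length) + 1 := by
          rw [hstrip]; simp only [List.length_cons]; omega
        rw [hn]
        simp [pvLoopA, ih (r + 8)]
        ring
      · have hstrip : pvLstripST (c :: cs) = c :: cs := by simp [pvLstripST, hsp, htb]
        have hn : (c :: cs).length - (pvLstripST (c :: cs)).length = 0 := by rw [hstrip]; omega
        rw [hn]
        simp [pvLoopA, hsp, htb]

-- ===== VERDICT (by name: the statement is the Claim_ definition above) =====
theorem get_indent_length_py_spec : Claim_equal_get_indent_length_py := by
  intro line _
  unfold Spec_get_indent_length_py get_indent_length_py get_indent_length_py_alt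
  have hle := pvLstripST_length_le line.toList
  show pvLoopA line.toList 0 =
    ((PySem.Chars.count (PySem.List.slice line.toList none
        (some ((line.toList.length : Int) - ((pvLstripST line.toList).length : Int)))) [' '] : Int)
      + (PySem.Chars.count (PySem.List.slice line.toList none
        (some ((line.toList.length : Int) - ((pvLstripST line.toList).length : Int)))) ['\t'] : Int) * 8)
  have hb : (0 : Int) ≤ (line.toList.length : Int) - ((pvLstripST line.toList).length : Int) := by omega
  rw [PySem.List.slice_to line.toList hb]
  have ht : (((line.toList.length : Int) - ((pvLstripST line.toList).length : Int)).toNat)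
      = line.toList.length - (pvLstripST line.toList).length := by omega
  rw [ht, pvCount_single, pvCount_single, pvKey]
  ring
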